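-- pv_equiv track=rewrite | github.com/ximicpp/XOffsetDatastructure | tools/xds_generator.py | split_template_args
-- ===== SOURCE A (Python) =====
-- from typing import List, Dict, Any
--
-- def split_template_args(args_str: str) -> List[str]:
--     """Split template arguments handling nested templates"""
--     args = []
--     current = ""
--     depth = 0
--
--     for char in args_str:
--         if char == '<':
--             depth += 1
--             current += char
--         elif char == '>':
--             depth -= 1
--             current += char
--         elif char == ',' and depth == 0:
--             args.append(current.strip())
--             current = ""
--         else:
--             current += char
--
--     if current.strip():
--         args.append(current.strip())
--
--     return args
-- ===== SOURCE B (Python) =====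
-- from typing import List
--
-- def split_template_args(args_str: str) -> List[str]:
--     """Split template arguments handling nested templates (recursive-descent rewrite)."""
--     def _top_comma(s: str) -> int:
--         depth = 0
--         for i, ch in enumerate(s):
--             if ch == '<':
--                 depth += 1
--             elif ch == '>':
--                 depth -= 1
--             elif ch == ',' and depth == 0:
--                 return i
--         return -1
--
--     args = []
--     rest = args_str
--     while True:
--         i = _top_comma(rest)
--         if i < 0:
--             last = rest.strip()
--             if last:
--                 args.append(last)
--             return args
--         args.append(rest[:i].strip())
--         rest = rest[i + 1:]
-- ===== Notes on version B (the rewrite author's own statement) =====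
-- stated objective: alternative
-- what changed: Replaced the single character-by-character accumulator loop (args/current/depth state) by a recursive-descent splitter: a helper scans for the next top-level comma index, the string is sliced there, and the process repeats on the remainder.
import Mathlib
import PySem

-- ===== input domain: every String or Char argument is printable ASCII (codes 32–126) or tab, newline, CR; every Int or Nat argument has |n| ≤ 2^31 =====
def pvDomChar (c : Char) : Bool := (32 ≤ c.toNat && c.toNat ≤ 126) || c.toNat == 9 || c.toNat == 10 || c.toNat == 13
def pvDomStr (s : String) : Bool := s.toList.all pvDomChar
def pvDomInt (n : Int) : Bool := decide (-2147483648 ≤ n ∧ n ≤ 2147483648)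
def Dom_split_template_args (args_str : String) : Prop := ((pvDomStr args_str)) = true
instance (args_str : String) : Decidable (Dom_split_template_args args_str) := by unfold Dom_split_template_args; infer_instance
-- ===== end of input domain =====

-- B replaces A's single accumulator loop by a recursive-descent splitter (find next top-level comma, slice, recurse); objective: alternative decomposition, same cost.

-- ===== PORT A =====
-- one step of A's for-loop; state = (args, current, depth)
def aStep (st : List (List Char) × List Char × Int) (c : Char) : List (List Char) × List Char × Int :=
  let args := st.1
  let current := st.2.1
  let depth := st.2.2
  if c = '<' then (args, current ++ [c], depth + 1)
  else if c = '>' then (args, current ++ [c], depth - 1)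
  else if c = ',' ∧ depth = 0 then (args ++ [PySem.Chars.strip current], [], depth)
  else (args, current ++ [c], depth)

def split_template_args (args_str : String) : List String :=
  let st := args_str.toList.foldl aStep ([], [], 0)
  let args := st.1
  let current := st.2.1
  (if PySem.Chars.strip current ≠ [] then args ++ [PySem.Chars.strip current] else args).map String.ofList

-- ===== PORT B =====
-- B's helper _top_comma: index of the first comma at angle-bracket depth 0, none if absent
def topComma : List Char → Nat → Int → Option Nat
  | [], _, _ => none
  | c :: rest, i, depth =>
    if c = '<' then topComma rest (i + 1) (depth + 1)
    else if c = '>' then topComma rest (i + 1) (depth - 1)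
    else if c = ',' ∧ depth = 0 then some i
    else topComma rest (i + 1) depth

-- index shift: the absolute index is the start offset plus the relative one (used for termination)
theorem topComma_shift : ∀ (cs : List Char) (i : Nat) (d : Int),
    topComma cs i d = (topComma cs 0 d).map (i + ·) := by
  intro cs
  induction cs with
  | nil => intro i d; simp [topComma]
  | cons c rest ih =>
    intro i d
    simp only [topComma]
    split_ifs with h1 h2 h3
    · rw [ih (i + 1), ih 1, Option.map_map]; congr 1; funext j; simp; omega
    · rw [ih (i + 1), ih 1, Option.map_map]; congr 1; funext j; simp; omega
    · simp
    · rw [ih (i + 1), ih 1, Option.map_map]; congr 1; funext j; simp; omega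

theorem topComma_lt_length : ∀ (cs : List Char) (d : Int) (i : Nat),
    topComma cs 0 d = some i → i < cs.length := by
  intro cs
  induction cs with
  | nil => intro d i h; simp [topComma] at h
  | cons c rest ih =>
    intro d i h
    simp only [topComma] at h
    split_ifs at h with h1 h2 h3
    · rw [topComma_shift] at h
      rcases Option.map_eq_some_iff.mp h with ⟨j, hj, hij⟩
      have := ih _ _ hj; simp; omega
    · rw [topComma_shift] at h
      rcases Option.map_eq_some_iff.mp h with ⟨j, hj, hij⟩
      have := ih _ _ hj; simp; omega
    · simp only [Option.some.injEq] at h; simp; omega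
    · rw [topComma_shift] at h
      rcases Option.map_eq_some_iff.mp h with ⟨j, hj, hij⟩
      have := ih _ _ hj; simp; omega

-- B's while-loop over the remaining string
def bLoop (rest : List Char) (args : List (List Char)) : List (List Char) :=
  match h : topComma rest 0 0 with
  | none =>
      let last := PySem.Chars.strip rest
      if last ≠ [] then args ++ [last] else args
  | some i => bLoop (rest.drop (i + 1)) (args ++ [PySem.Chars.strip (rest.take i)])
termination_by rest.length
decreasing_by
  have := topComma_lt_length rest 0 i h
  simp [List.length_drop]; omega

def split_template_args_alt (args_str : String) : List String :=
  (bLoop args_str.toList []).map String.ofList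

-- ===== PRECONDITION & SPEC =====
def Spec_split_template_args (args_str : String) (out : List String) : Prop := out = split_template_args_alt args_str
instance (args_str : String) (out : List String) : Decidable (Spec_split_template_args args_str out) := by unfold Spec_split_template_args; infer_instance

-- ===== CLAIM (what is proved, stated in full; the proofs are below) =====
def Claim_equal_split_template_args : Prop := ∀ (args_str : String), Dom_split_template_args args_str → Spec_split_template_args args_str (split_template_args args_str)

-- ===== LEMMAS AND PROOFS =====

-- when no top-level comma remains, A's loop only appends to current and never touches args
theorem foldl_aStep_none : ∀ (cs : List Char) (args : List (List Char)) (cur : List Char) (d : Int),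
    topComma cs 0 d = none →
    ∃ d', cs.foldl aStep (args, cur, d) = (args, cur ++ cs, d') := by
  intro cs
  induction cs with
  | nil => intro args cur d _; exact ⟨d, by simp⟩
  | cons c rest ih =>
    intro args cur d h
    simp only [topComma] at h
    simp only [List.foldl_cons, aStep]
    split_ifs at h ⊢ with h1 h2 h3
    · rw [topComma_shift] at h
      obtain ⟨d', hd⟩ := ih args (cur ++ [c]) (d + 1) (by simpa using h)
      exact ⟨d', by simpa using hd⟩
    · rw [topComma_shift] at h
      obtain ⟨d', hd⟩ := ih args (cur ++ [c]) (d - 1) (by simpa using h)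
      exact ⟨d', by simpa using hd⟩
    · rw [topComma_shift] at h
      obtain ⟨d', hd⟩ := ih args (cur ++ [c]) d (by simpa using h)
      exact ⟨d', by simpa using hd⟩

-- when the first top-level comma is at i, A's loop splits there and restarts with empty current at depth 0
theorem foldl_aStep_some : ∀ (cs : List Char) (i : Nat) (args : List (List Char)) (cur : List Char) (d : Int),
    topComma cs 0 d = some i →
    cs.foldl aStep (args, cur, d) =
      (cs.drop (i + 1)).foldl aStep (args ++ [PySem.Chars.strip (cur ++ cs.take i)], [], 0) := by
  intro cs
  induction cs with
  | nil => intro i args cur d h; simp [topComma] at h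
  | cons c rest ih =>
    intro i args cur d h
    simp only [topComma] at h
    simp only [List.foldl_cons, aStep]
    split_ifs at h ⊢ with h1 h2 h3
    · rw [topComma_shift] at h
      rcases Option.map_eq_some_iff.mp h with ⟨j, hj, hij⟩
      rw [ih j args (cur ++ [c]) (d + 1) hj]
      have : i = j + 1 := by omega
      subst this
      simp
    · rw [topComma_shift] at h
      rcases Option.map_eq_some_iff.mp h with ⟨j, hj, hij⟩
      rw [ih j args (cur ++ [c]) (d - 1) hj]
      have : i = j + 1 := by omega
      subst this
      simp
    · simp only [Option.some.injEq] at h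
      subst h
      simp [h3.2]
    · rw [topComma_shift] at h
      rcases Option.map_eq_some_iff.mp h with ⟨j, hj, hij⟩
      rw [ih j args (cur ++ [c]) d hj]
      have : i = j + 1 := by omega
      subst this
      simp

theorem main_eq : ∀ (cs : List Char) (args : List (List Char)),
    (let st := cs.foldl aStep (args, [], 0)
     if PySem.Chars.strip st.2.1 ≠ [] then st.1 ++ [PySem.Chars.strip st.2.1] else st.1) =
    bLoop cs args := by
  intro cs args
  induction cs, args using bLoop.induct with
  | case1 rest args h _ =>
    obtain ⟨d', hd⟩ := foldl_aStep_none rest args [] 0 h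
    rw [bLoop.eq_def]
    split
    · next h' =>
      simp only [hd]
      simp
    · next i h' => rw [h] at h'; exact absurd h' (by simp)
  | case2 rest args h _ =>
    obtain ⟨d', hd⟩ := foldl_aStep_none rest args [] 0 h
    rw [bLoop.eq_def]
    split
    · next h' =>
      simp only [hd]
      simp
    · next i h' => rw [h] at h'; exact absurd h' (by simp)
  | case3 rest args i h ih =>
    rw [foldl_aStep_some rest i args [] 0 h]
    rw [bLoop.eq_def]
    split
    · next h' => rw [h] at h'; exact absurd h' (by simp)
    · next j h' =>
      rw [h] at h'
      simp only [Option.some.injEq] at h'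
      subst h'
      simpa using ih

-- ===== VERDICT (by name: the statement is the Claim_ definition above) =====
theorem split_template_args_spec : Claim_equal_split_template_args := by
  intro s _
  unfold Spec_split_template_args split_template_args split_template_args_alt
  rw [← main_eq s.toList []]
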